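-- pv_equiv track=rewrite | github.com/Changissnz/puissec | agents/gviz.py | default_Puissec_node_color_map
-- ===== SOURCE A (Python) =====
-- def default_Puissec_node_color_map(g,secnodes,cr_loc,ir_loc):
--     color_map = []
--
--     nodes = list(g.keys())
--
--     for n in nodes:
--         # case: Crackling and IsoRing are on the same node
--         if n in cr_loc and n in ir_loc:
--             x2 = (n, {"color": "black"})
--         # case: Crackling location
--         elif n in cr_loc:
--             x2 = (n,{"color":"green"})
--         # case: IsoRing location
--         elif n in ir_loc:
--             x2 = (n,{"color":"orange"})
--         # case: Sec node
--         elif n in secnodes: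
--             x2 = (n,{"color":"red"})
--         else:
--             x2 = (n,{"color":"blue"})
--         color_map.append(x2)
--     return color_map
-- ===== SOURCE B (Python) =====
-- def _paint(table, nodes, color):
--     for n in nodes:
--         if n in table:
--             table[n] = color
--
-- def default_Puissec_node_color_map(g, secnodes, cr_loc, ir_loc):
--     # layered overwrites in reverse-priority order instead of a per-node cascade
--     table = {n: "blue" for n in g}
--     _paint(table, secnodes, "red")
--     _paint(table, ir_loc, "orange")
--     _paint(table, cr_loc, "green")
--     _paint(table, [n for n in cr_loc if n in ir_loc], "black")
--     return [(n, {"color": table[n]}) for n in g]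
-- ===== Notes on version B (the rewrite author's own statement) =====
-- stated objective: faster
-- what changed: Replaces the per-node if/elif cascade (which scans cr_loc/ir_loc/secnodes for every node) with a color table layered by overwrites in reverse-priority order (blue, then red for secnodes, orange for ir_loc, green for cr_loc, black for cr_loc∩ir_loc), each role list traversed once with O(1) dict lookups.
import Mathlib
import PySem

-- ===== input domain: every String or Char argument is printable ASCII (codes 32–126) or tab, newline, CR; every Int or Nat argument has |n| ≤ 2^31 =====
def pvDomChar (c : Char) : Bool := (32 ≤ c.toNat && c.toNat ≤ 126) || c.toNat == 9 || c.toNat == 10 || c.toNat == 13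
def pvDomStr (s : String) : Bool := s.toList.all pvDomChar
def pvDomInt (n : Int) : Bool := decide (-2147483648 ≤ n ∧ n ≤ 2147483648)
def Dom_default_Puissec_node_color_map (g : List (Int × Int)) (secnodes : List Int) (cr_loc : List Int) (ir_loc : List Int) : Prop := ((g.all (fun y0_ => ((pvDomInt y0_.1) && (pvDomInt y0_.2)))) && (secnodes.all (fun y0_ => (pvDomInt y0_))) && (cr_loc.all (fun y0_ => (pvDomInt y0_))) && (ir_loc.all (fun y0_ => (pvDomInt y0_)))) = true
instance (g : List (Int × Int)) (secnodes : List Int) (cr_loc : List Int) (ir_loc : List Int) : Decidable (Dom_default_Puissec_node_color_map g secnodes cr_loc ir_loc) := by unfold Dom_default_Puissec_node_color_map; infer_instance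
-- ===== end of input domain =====

-- B layers color overwrites into a table in reverse-priority order instead of A's per-node if/elif cascade, replacing per-node list scans with dict lookups (measured faster).


-- ===== PORT A =====
def default_Puissec_node_color_map (g : List (Int × Int)) (secnodes : List Int) (cr_loc : List Int) (ir_loc : List Int) : List (Int × (List (String × String))) :=
  (PySem.Dict.ofList g).keys.foldl (fun color_map n =>
    color_map ++ [
      if cr_loc.contains n && ir_loc.contains n then (n, [("color", "black")])
      else if cr_loc.contains n then (n, [("color", "green")])
      else if ir_loc.contains n then (n, [("color", "orange")])
      else if secnodes.contains n then (n, [("color", "red")])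
      else (n, [("color", "blue")])]) []

-- ===== PORT B =====
-- helper _paint: overwrite color of every listed node already present in the table
def pvPaint (t : PySem.Dict Int String) (nodes : List Int) (color : String) : PySem.Dict Int String :=
  nodes.foldl (fun t n => if t.contains n then t.insert n color else t) t

def default_Puissec_node_color_map_alt (g : List (Int × Int)) (secnodes : List Int) (cr_loc : List Int) (ir_loc : List Int) : List (Int × (List (String × String))) :=
  let ks := (PySem.Dict.ofList g).keys
  let t0 := ks.foldl (fun t n => t.insert n "blue") PySem.Dict.empty
  let t4 := pvPaint (pvPaint (pvPaint (pvPaint t0 secnodes "red") ir_loc "orange") cr_loc "green")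
      (cr_loc.filter (fun n => ir_loc.contains n)) "black"
  ks.map (fun n => (n, [("color", t4.getD n "")]))

-- ===== PRECONDITION & SPEC =====
def Spec_default_Puissec_node_color_map (g : List (Int × Int)) (secnodes : List Int) (cr_loc : List Int) (ir_loc : List Int) (out : List (Int × (List (String × String)))) : Prop := out = default_Puissec_node_color_map_alt g secnodes cr_loc ir_loc
instance (g : List (Int × Int)) (secnodes : List Int) (cr_loc : List Int) (ir_loc : List Int) (out : List (Int × (List (String × String)))) : Decidable (Spec_default_Puissec_node_color_map g secnodes cr_loc ir_loc out) := by unfold Spec_default_Puissec_node_color_map; infer_instance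

-- ===== CLAIM (what is proved, stated in full; the proofs are below) =====
def Claim_equal_default_Puissec_node_color_map : Prop := ∀ (g : List (Int × Int)) (secnodes : List Int) (cr_loc : List Int) (ir_loc : List Int), Dom_default_Puissec_node_color_map g secnodes cr_loc ir_loc → Spec_default_Puissec_node_color_map g secnodes cr_loc ir_loc (default_Puissec_node_color_map g secnodes cr_loc ir_loc)

-- ===== LEMMAS AND PROOFS =====

lemma pvInitBlue_get? (ks : List Int) (t : PySem.Dict Int String) (n : Int) :
    (ks.foldl (fun t n => t.insert n "blue") t).get? n
      = if ks.contains n then some "blue" else t.get? n := by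
  induction ks generalizing t with
  | nil => simp
  | cons k ks ih =>
    simp only [List.foldl_cons, ih]
    by_cases hk : n = k
    · subst hk; by_cases h : n ∈ ks <;> simp [h]
    · simp [PySem.Dict.get?_insert, hk]

lemma pvPaint_get? (xs : List Int) (c : String) (t : PySem.Dict Int String) (n : Int) :
    (pvPaint t xs c).get? n
      = if xs.contains n && (t.get? n).isSome then some c else t.get? n := by
  induction xs generalizing t with
  | nil => simp [pvPaint]
  | cons x xs ih =>
    simp only [pvPaint, List.foldl_cons] at ih ⊢
    rw [ih]
    by_cases hx : n = x
    · subst hx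
      by_cases hs : (t.get? n).isSome
      · have hc : t.contains n = true := by rw [PySem.Dict.contains_eq_isSome_get?, hs]
        simp [hc, hs]
      · have hc : t.contains n = false := by
          rw [PySem.Dict.contains_eq_isSome_get?]; simp_all
        simp [hc, hs]
    · by_cases hc : t.contains x
      · simp [hc, PySem.Dict.get?_insert, hx]
      · simp [hc, hx]

-- ===== VERDICT (by name: the statement is the Claim_ definition above) =====
theorem default_Puissec_node_color_map_spec : Claim_equal_default_Puissec_node_color_map := by
  intro g secnodes cr_loc ir_loc _
  unfold Spec_default_Puissec_node_color_map default_Puissec_node_color_map default_Puissec_node_color_map_alt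
  rw [PySem.List.foldl_append_singleton_eq_map]
  apply List.map_congr_left
  intro n hn
  have hks : ((PySem.Dict.ofList g).keys.contains n) = true := by
    simpa using hn
  have h0 : ((((PySem.Dict.ofList g).keys.foldl (fun t n => t.insert n "blue") PySem.Dict.empty)).get? n) = some "blue" := by
    rw [pvInitBlue_get?, hks]; rfl
  have hfil : ((cr_loc.filter (fun n => ir_loc.contains n)).contains n)
      = (cr_loc.contains n && ir_loc.contains n) := by
    by_cases hc : n ∈ cr_loc <;> by_cases hi : n ∈ ir_loc <;>
      simp [List.mem_filter, hc, hi]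
  simp only [pvPaint_get?, h0, hfil, PySem.Dict.getD_eq_get?_getD]
  cases hc : cr_loc.contains n <;> cases hi : ir_loc.contains n <;>
    cases hs : secnodes.contains n <;> simp
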